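-- pv_equiv track=rewrite | github.com/Zora-LM/FAGA | utils/data_utils.py | reidx
-- ===== SOURCE A (Python) =====
-- def reidx(tri):
--     tri_reidx = []
--     ent_reidx = dict()
--     rel_reidx = dict()
--
--     entidx = 0
--     relidx = 0
--
--     # rel_reidx['self'] = relidx
--     # relidx += 1
--
--     for h, r, t in tri:
--         if h not in ent_reidx.keys():
--             ent_reidx[h] = entidx
--             entidx += 1
--         if t not in ent_reidx.keys():
--             ent_reidx[t] = entidx
--             entidx += 1
--         if r not in rel_reidx.keys():
--             rel_reidx[r] = relidx
--             relidx += 1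
--         tri_reidx.append([ent_reidx[h], rel_reidx[r], ent_reidx[t]])
--
--     # for h in ent_reidx.keys():
--     #     tri_reidx.append([ent_reidx[h], rel_reidx['self'], ent_reidx[h]])
--
--     return tri_reidx, dict(rel_reidx), dict(ent_reidx)
-- ===== SOURCE B (Python) =====
-- def reidx(tri):
--     # dedup the interleaved entity stream (h before t per triple) and the relation
--     # stream, then number each table by position and remap by pure lookup.
--     ent_order = list(dict.fromkeys(x for h, _, t in tri for x in (h, t)))
--     rel_order = list(dict.fromkeys(r for _, r, _ in tri))
--     ent_reidx = {e: i for i, e in enumerate(ent_order)}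
--     rel_reidx = {r: i for i, r in enumerate(rel_order)}
--     tri_reidx = [[ent_reidx[h], rel_reidx[r], ent_reidx[t]] for h, r, t in tri]
--     return tri_reidx, rel_reidx, ent_reidx
-- ===== Notes on version B (the rewrite author's own statement) =====
-- stated objective: alternative
-- what changed: Replaces A's single stateful loop (conditional dict inserts with explicit id counters interleaved with output construction) by a staged pipeline: dedup the interleaved entity/relation key streams with dict.fromkeys, number each table by enumerate, then remap the triples by pure lookups.
import Mathlib
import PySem

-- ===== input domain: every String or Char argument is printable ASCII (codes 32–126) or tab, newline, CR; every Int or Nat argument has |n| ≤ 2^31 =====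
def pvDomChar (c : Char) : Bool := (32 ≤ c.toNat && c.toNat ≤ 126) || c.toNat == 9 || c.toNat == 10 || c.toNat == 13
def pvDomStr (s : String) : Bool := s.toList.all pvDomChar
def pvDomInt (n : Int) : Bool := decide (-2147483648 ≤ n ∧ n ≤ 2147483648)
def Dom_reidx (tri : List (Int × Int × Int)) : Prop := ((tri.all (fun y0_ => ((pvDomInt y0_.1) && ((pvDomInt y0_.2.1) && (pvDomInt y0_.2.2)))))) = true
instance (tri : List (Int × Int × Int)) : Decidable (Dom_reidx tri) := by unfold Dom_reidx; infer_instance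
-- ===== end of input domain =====

-- B replaces A's single stateful loop (conditional dict inserts with explicit id counters,
-- interleaved with output construction) by a staged pipeline: dedup the interleaved key
-- streams (dict.fromkeys), number each table by enumerate, remap by pure lookups.
-- Objective: alternative; same value everywhere.

-- ===== PORT A =====
-- A's loop body; dict indexing ent_reidx[h] etc. is ported as getD _ 0, exact here because the
-- key was just registered (Python never raises KeyError in A).
def reidxStepA (s : List (List Int) × PySem.Dict Int Int × PySem.Dict Int Int × Int × Int)
    (x : Int × Int × Int) : List (List Int) × PySem.Dict Int Int × PySem.Dict Int Int × Int × Int :=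
  match s, x with
  | (out, ent, rel, ei, ri), (h, r, t) =>
    let p1 := if ent.contains h then (ent, ei) else (ent.insert h ei, ei + 1)
    let p2 := if p1.1.contains t then p1 else (p1.1.insert t p1.2, p1.2 + 1)
    let q := if rel.contains r then (rel, ri) else (rel.insert r ri, ri + 1)
    (out ++ [[p2.1.getD h 0, q.1.getD r 0, p2.1.getD t 0]], p2.1, q.1, p2.2, q.2)

def reidx (tri : List (Int × Int × Int)) : List (List Int) × (List (Int × Int)) × (List (Int × Int)) :=
  let s := tri.foldl reidxStepA ([], PySem.Dict.empty, PySem.Dict.empty, 0, 0)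
  (s.1, s.2.2.1.items, s.2.1.items)

-- ===== PORT B =====
-- dict comprehension {k: i for i, k in enumerate(order)}
def mkIdx (o : List Int) : PySem.Dict Int Int :=
  (PySem.List.enumerate o 0).foldl (fun d p => d.insert p.2 p.1) PySem.Dict.empty

def reidx_alt (tri : List (Int × Int × Int)) : List (List Int) × (List (Int × Int)) × (List (Int × Int)) :=
  let entOrder := PySem.List.dedup (tri.flatMap (fun x => [x.1, x.2.2]))
  let relOrder := PySem.List.dedup (tri.map (fun x => x.2.1))
  let entD := mkIdx entOrder
  let relD := mkIdx relOrder
  (tri.map (fun x => [entD.getD x.1 0, relD.getD x.2.1 0, entD.getD x.2.2 0]), relD.items, entD.items)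

-- ===== PRECONDITION & SPEC =====
def Spec_reidx (tri : List (Int × Int × Int)) (out : List (List Int) × (List (Int × Int)) × (List (Int × Int))) : Prop := out = reidx_alt tri
instance (tri : List (Int × Int × Int)) (out : List (List Int) × (List (Int × Int)) × (List (Int × Int))) : Decidable (Spec_reidx tri out) := by unfold Spec_reidx; infer_instance

-- ===== CLAIM (what is proved, stated in full; the proofs are below) =====
def Claim_equal_reidx : Prop := ∀ (tri : List (Int × Int × Int)), Dom_reidx tri → Spec_reidx tri (reidx tri)

-- ===== LEMMAS AND PROOFS =====

-- the entity registration order (h then t per triple) and the relation registration order,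
-- as set-folds starting from an arbitrary already-registered table
def entFold (l : List (Int × Int × Int)) (s : List Int) : List Int :=
  l.foldl (fun s x => PySem.Set.add (PySem.Set.add s x.1) x.2.2) s

def relFold (l : List (Int × Int × Int)) (s : List Int) : List Int :=
  l.foldl (fun s x => PySem.Set.add s x.2.1) s

lemma mkIdx_snoc (o : List Int) (x : Int) :
    mkIdx (o ++ [x]) = (mkIdx o).insert x (o.length : Int) := by
  simp [mkIdx, PySem.List.enumerate_append, PySem.List.enumerate]

lemma contains_mkIdx (o : List Int) (k : Int) :
    (mkIdx o).contains k = decide (k ∈ o) := by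
  rw [PySem.Dict.contains_eq_decide_mem_keys]
  simp [mkIdx, PySem.Dict.keys_foldl_insert_key, PySem.List.map_snd_enumerate,
    PySem.Set.mem_ofList, PySem.Set.update_nil_left]

-- one conditional registration step of A equals a Set.add on the order list
lemma stepA_one (o : List Int) (k : Int) :
    (if (mkIdx o).contains k then (mkIdx o, (o.length : Int))
     else ((mkIdx o).insert k (o.length : Int), (o.length : Int) + 1)) =
      (mkIdx (PySem.Set.add o k), ((PySem.Set.add o k).length : Int)) := by
  rw [contains_mkIdx, PySem.Set.add_eq_ite]
  by_cases h : k ∈ o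
  · simp [h]
  · rw [← mkIdx_snoc]
    simp [h]

lemma getD_mkIdx_append (u : List Int) : ∀ (s : List Int) (k : Int), k ∈ s → (s ++ u).Nodup →
    (mkIdx (s ++ u)).getD k 0 = (mkIdx s).getD k 0 := by
  induction u with
  | nil => intro s k _ _; simp
  | cons x u ih =>
    intro s k hk hnd
    have h1 : s ++ x :: u = (s ++ [x]) ++ u := by simp
    have hnd2 : (s ++ x :: u).Nodup := hnd
    rw [List.nodup_append] at hnd2
    have hx : x ∉ s := fun hxs => hnd2.2.2 x hxs x (by simp) rfl
    rw [h1, ih (s ++ [x]) k (List.mem_append_left _ hk) (by simpa using hnd), mkIdx_snoc]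
    rw [PySem.Dict.getD_insert_of_ne]
    intro he; exact hx (he ▸ hk)

lemma add_extends (s : List Int) (x : Int) : ∃ v, PySem.Set.add s x = s ++ v := by
  rw [PySem.Set.add_eq_ite]
  by_cases h : x ∈ s
  · exact ⟨[], by simp [h]⟩
  · exact ⟨[x], by simp [h]⟩

lemma entFold_extends (l : List (Int × Int × Int)) : ∀ s, ∃ u, entFold l s = s ++ u := by
  induction l with
  | nil => exact fun s => ⟨[], by simp [entFold]⟩
  | cons x l ih =>
    intro s
    obtain ⟨v1, h1⟩ := add_extends s x.1
    obtain ⟨v2, h2⟩ := add_extends (PySem.Set.add s x.1) x.2.2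
    obtain ⟨u, hu⟩ := ih (PySem.Set.add (PySem.Set.add s x.1) x.2.2)
    exact ⟨v1 ++ v2 ++ u, by simp only [entFold, List.foldl_cons] at hu ⊢; rw [hu, h2, h1]; simp⟩

lemma relFold_extends (l : List (Int × Int × Int)) : ∀ s, ∃ u, relFold l s = s ++ u := by
  induction l with
  | nil => exact fun s => ⟨[], by simp [relFold]⟩
  | cons x l ih =>
    intro s
    obtain ⟨v1, h1⟩ := add_extends s x.2.1
    obtain ⟨u, hu⟩ := ih (PySem.Set.add s x.2.1)
    exact ⟨v1 ++ u, by simp only [relFold, List.foldl_cons] at hu ⊢; rw [hu, h1]; simp⟩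

lemma entFold_nodup (l : List (Int × Int × Int)) : ∀ s, s.Nodup → (entFold l s).Nodup := by
  induction l with
  | nil => intro s h; simpa [entFold]
  | cons x l ih =>
    intro s h
    exact ih _ (PySem.Set.nodup_add _ _ (PySem.Set.nodup_add _ _ h))

lemma relFold_nodup (l : List (Int × Int × Int)) : ∀ s, s.Nodup → (relFold l s).Nodup := by
  induction l with
  | nil => intro s h; simpa [relFold]
  | cons x l ih =>
    intro s h
    exact ih _ (PySem.Set.nodup_add _ _ h)

-- stability: a key already in the table keeps its id through the rest of the registration
lemma getD_stable_ent (l : List (Int × Int × Int)) (s : List Int) (k : Int)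
    (hk : k ∈ s) (hs : s.Nodup) :
    (mkIdx (entFold l s)).getD k 0 = (mkIdx s).getD k 0 := by
  obtain ⟨u, hu⟩ := entFold_extends l s
  rw [hu]
  exact getD_mkIdx_append u s k hk (hu ▸ entFold_nodup l s hs)

lemma getD_stable_rel (l : List (Int × Int × Int)) (s : List Int) (k : Int)
    (hk : k ∈ s) (hs : s.Nodup) :
    (mkIdx (relFold l s)).getD k 0 = (mkIdx s).getD k 0 := by
  obtain ⟨u, hu⟩ := relFold_extends l s
  rw [hu]
  exact getD_mkIdx_append u s k hk (hu ▸ relFold_nodup l s hs)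

-- the main loop correspondence: A's fold, started with counters equal to the table sizes,
-- produces the dicts of the registration orders and the lookup-map of the outputs
lemma reidx_loop (l : List (Int × Int × Int)) : ∀ (out : List (List Int)) (eo ro : List Int),
    eo.Nodup → ro.Nodup →
    l.foldl reidxStepA (out, mkIdx eo, mkIdx ro, (eo.length : Int), (ro.length : Int)) =
      (out ++ l.map (fun x =>
          [(mkIdx (entFold l eo)).getD x.1 0,
           (mkIdx (relFold l ro)).getD x.2.1 0,
           (mkIdx (entFold l eo)).getD x.2.2 0]),
        mkIdx (entFold l eo), mkIdx (relFold l ro),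
        ((entFold l eo).length : Int), ((relFold l ro).length : Int)) := by
  induction l with
  | nil => intro out eo ro _ _; simp [entFold, relFold]
  | cons x l ih =>
    intro out eo ro he hr
    obtain ⟨h, r, t⟩ := x
    have he1 : (PySem.Set.add eo h).Nodup := PySem.Set.nodup_add _ _ he
    have he2 : (PySem.Set.add (PySem.Set.add eo h) t).Nodup := PySem.Set.nodup_add _ _ he1
    have hr1 : (PySem.Set.add ro r).Nodup := PySem.Set.nodup_add _ _ hr
    have hstep : reidxStepA (out, mkIdx eo, mkIdx ro, (eo.length : Int), (ro.length : Int)) (h, r, t) =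
        (out ++ [[(mkIdx (PySem.Set.add (PySem.Set.add eo h) t)).getD h 0,
                  (mkIdx (PySem.Set.add ro r)).getD r 0,
                  (mkIdx (PySem.Set.add (PySem.Set.add eo h) t)).getD t 0]],
         mkIdx (PySem.Set.add (PySem.Set.add eo h) t),
         mkIdx (PySem.Set.add ro r),
         ((PySem.Set.add (PySem.Set.add eo h) t).length : Int),
         ((PySem.Set.add ro r).length : Int)) := by
      simp only [reidxStepA]
      rw [stepA_one eo h, stepA_one (PySem.Set.add eo h) t, stepA_one ro r]
    rw [List.foldl_cons, hstep, ih _ _ _ he2 hr1]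
    have hEnt : entFold (⟨h, r, t⟩ :: l) eo = entFold l (PySem.Set.add (PySem.Set.add eo h) t) := rfl
    have hRel : relFold (⟨h, r, t⟩ :: l) ro = relFold l (PySem.Set.add ro r) := rfl
    rw [hEnt, hRel, List.append_assoc]
    refine congrArg (fun o => (out ++ o, _)) ?_
    simp only [List.map_cons, List.singleton_append]
    refine congrArg₂ (· :: ·) ?_ rfl
    rw [getD_stable_ent l _ h (by simp [PySem.Set.mem_add]) he2,
        getD_stable_ent l _ t (by simp [PySem.Set.mem_add]) he2,
        getD_stable_rel l _ r (by simp [PySem.Set.mem_add]) hr1]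

-- ===== VERDICT (by name: the statement is the Claim_ definition above) =====
theorem reidx_spec : Claim_equal_reidx := by
  intro tri _
  show reidx tri = reidx_alt tri
  simp only [reidx, reidx_alt]
  have h0 : (PySem.Dict.empty : PySem.Dict Int Int) = mkIdx [] := rfl
  rw [h0, show (0 : Int) = (([] : List Int).length : Int) from rfl,
    reidx_loop tri [] [] [] List.nodup_nil List.nodup_nil]
  have hent : PySem.List.dedup (tri.flatMap (fun x => [x.1, x.2.2])) = entFold tri [] := by
    rw [PySem.List.dedup_eq_ofList, PySem.Set.ofList_eq_foldl, List.foldl_flatMap]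
    simp [entFold, List.foldl]
  have hrel : PySem.List.dedup (tri.map (fun x => x.2.1)) = relFold tri [] := by
    rw [PySem.List.dedup_eq_ofList, PySem.Set.ofList_eq_foldl, List.foldl_map]
    rfl
  rw [hent, hrel]
  simp
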